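-- pv_equiv track=rewrite | github.com/nu20/PYTHON | consecutive.py | concecutive
-- ===== SOURCE A (Python) =====
-- def concecutive(a , a_size):
--     counter = 0
--     max1 = 0
--     for i in range(0 , a_size):
--         if (a[i] == 0):
--             counter = 0
--         else :
--             counter+=1
--             max1 = max(max1 , counter)
--
--     return max1
-- ===== SOURCE B (Python) =====
-- from itertools import groupby
--
--
-- def concecutive(a, a_size):
--     prefix = a[:max(a_size, 0)]
--     return max((sum(1 for _ in g)
--                 for zero, g in groupby(prefix, key=lambda x: x == 0)
--                 if not zero),
--                default=0)
-- ===== Notes on version B (the rewrite author's own statement) =====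
-- stated objective: idiomatic
-- what changed: Replaces the running-counter loop with itertools.groupby: slice the first a_size elements, group them into maximal zero/non-zero runs, and take the max length over the non-zero runs (default 0).
import Mathlib
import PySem

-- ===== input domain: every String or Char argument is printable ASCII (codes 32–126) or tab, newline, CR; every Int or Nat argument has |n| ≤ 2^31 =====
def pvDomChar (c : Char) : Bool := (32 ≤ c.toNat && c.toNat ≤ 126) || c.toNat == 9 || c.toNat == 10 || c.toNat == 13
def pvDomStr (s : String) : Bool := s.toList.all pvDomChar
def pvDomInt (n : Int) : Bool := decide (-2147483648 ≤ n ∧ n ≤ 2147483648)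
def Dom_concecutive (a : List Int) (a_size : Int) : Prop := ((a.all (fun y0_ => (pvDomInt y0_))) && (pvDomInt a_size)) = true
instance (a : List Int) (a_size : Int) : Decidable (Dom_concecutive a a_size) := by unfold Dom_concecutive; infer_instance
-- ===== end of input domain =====

-- B replaces A's running-counter loop with a groupby-style decomposition: slice the first
-- a_size elements, split them into maximal non-zero runs, and take the max run length (idiomatic).


-- ===== PORT A =====
-- literal port of A: fold over range(0, a_size) carrying (counter, max1);
-- a[i] is ported as pyGetD (index always in range under Pre_; out of range Python raises, excluded by Pre_)
def concecutive (a : List Int) (a_size : Int) : Int :=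
  ((PySem.List.pyRange 0 a_size 1).foldl
    (fun (s : Int × Int) i =>
      if PySem.List.pyGetD a i 0 = 0 then (0, s.2)
      else (s.1 + 1, max s.2 (s.1 + 1)))
    (0, 0)).2

-- ===== PORT B =====
-- hand port of itertools.groupby + filter + lengths (no PySem primitive for groupby):
-- nzRunLens l c yields the lengths of the maximal non-zero runs of l, with c the length
-- of the run currently open; exact for the groups groupby emits with key (x == 0), filtered to non-zero.
def nzRunLens : List Int → Int → List Int
  | [], c => if 0 < c then [c] else []
  | x :: xs, c =>
      if x = 0 then (if 0 < c then c :: nzRunLens xs 0 else nzRunLens xs 0)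
      else nzRunLens xs (c + 1)

def concecutive_alt (a : List Int) (a_size : Int) : Int :=
  let pfx := PySem.List.slice a none (some (max a_size 0))
  (nzRunLens pfx 0).foldl max 0

-- ===== PRECONDITION & SPEC =====
-- A indexes a[i] for every i in range(0, a_size) and raises IndexError when a_size > len(a);
-- exactly those inputs are excluded.
def Pre_concecutive (a : List Int) (a_size : Int) : Prop := a_size ≤ (a.length : Int)
instance (a : List Int) (a_size : Int) : Decidable (Pre_concecutive a a_size) := by unfold Pre_concecutive; infer_instance
def pvWitness_concecutive : List Int × Int := ([1, 0, 2, 3], 4)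

def Spec_concecutive (a : List Int) (a_size : Int) (out : Int) : Prop := out = concecutive_alt a a_size
instance (a : List Int) (a_size : Int) (out : Int) : Decidable (Spec_concecutive a a_size out) := by unfold Spec_concecutive; infer_instance

-- ===== CLAIM (what is proved, stated in full; the proofs are below) =====
def Claim_equal_concecutive : Prop := ∀ (a : List Int) (a_size : Int), Dom_concecutive a a_size → Pre_concecutive a a_size → Spec_concecutive a a_size (concecutive a a_size)

-- ===== LEMMAS AND PROOFS =====

-- max distributes over a foldl max
theorem foldl_max_max (xs : List Int) : ∀ (a b : Int),
    xs.foldl max (max a b) = max a (xs.foldl max b) := by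
  induction xs with
  | nil => intro a b; simp
  | cons x xs ih =>
    intro a b
    simp only [List.foldl_cons]
    rw [max_assoc, ih]

-- an open run of positive length c contributes at least c
theorem le_foldl_nzRunLens (xs : List Int) : ∀ (c : Int), 0 < c →
    c ≤ (nzRunLens xs c).foldl max 0 := by
  induction xs with
  | nil =>
    intro c hc
    simp only [nzRunLens, if_pos hc, List.foldl_cons, List.foldl_nil]
    omega
  | cons x xs ih =>
    intro c hc
    by_cases hx : x = 0
    · rw [show nzRunLens (x :: xs) c = c :: nzRunLens xs 0 by
        simp [nzRunLens, hx, hc]]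
      rw [List.foldl_cons]
      have := (PySem.List.le_foldl_max (nzRunLens xs 0) (max 0 c)).1
      omega
    · rw [show nzRunLens (x :: xs) c = nzRunLens xs (c + 1) by
        simp [nzRunLens, hx]]
      exact le_trans (by omega) (ih (c + 1) (by omega))

-- A's loop body over the materialised prefix list
def stepA (s : Int × Int) (x : Int) : Int × Int :=
  if x = 0 then (0, s.2) else (s.1 + 1, max s.2 (s.1 + 1))

-- main invariant: A's fold from state (c, m) is m maxed with B's run lengths (run open at length c)
theorem loop_eq_runs (xs : List Int) : ∀ (c m : Int), 0 ≤ c → c ≤ m →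
    (xs.foldl stepA (c, m)).2 = max m ((nzRunLens xs c).foldl max 0) := by
  induction xs with
  | nil =>
    intro c m hc hcm
    by_cases h : 0 < c <;> simp [nzRunLens, h] <;> omega
  | cons x xs ih =>
    intro c m hc hcm
    by_cases hx : x = 0
    · rw [List.foldl_cons, show stepA (c, m) x = (0, m) by simp [stepA, hx]]
      rw [ih 0 m le_rfl (le_trans hc hcm)]
      by_cases h : 0 < c
      · rw [show nzRunLens (x :: xs) c = c :: nzRunLens xs 0 by simp [nzRunLens, hx, h]]
        rw [List.foldl_cons, show max (0 : Int) c = max c 0 from max_comm _ _, foldl_max_max]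
        omega
      · rw [show nzRunLens (x :: xs) c = nzRunLens xs 0 by simp [nzRunLens, hx, h]]
    · rw [List.foldl_cons, show stepA (c, m) x = (c + 1, max m (c + 1)) by simp [stepA, hx]]
      rw [show nzRunLens (x :: xs) c = nzRunLens xs (c + 1) by simp [nzRunLens, hx]]
      rw [ih (c + 1) (max m (c + 1)) (by omega) (le_max_right _ _)]
      have h1 : c + 1 ≤ (nzRunLens xs (c + 1)).foldl max 0 :=
        le_foldl_nzRunLens xs (c + 1) (by omega)
      omega

-- the prefixes the two ports read are the same list
theorem prefix_eq (a : List Int) (a_size : Int) :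
    PySem.List.slice a none (some (max a_size 0)) = a.take a_size.toNat := by
  rw [PySem.List.slice_to a (le_max_right a_size 0)]
  congr 1
  omega

-- A's indexed range loop is the fold of stepA over the prefix list
theorem portA_eq_fold (a : List Int) (a_size : Int) (h : a_size ≤ (a.length : Int)) :
    concecutive a a_size = ((a.take a_size.toNat).foldl stepA (0, 0)).2 := by
  unfold concecutive
  set t := a.take a_size.toNat with ht
  have hlen : t.length = a_size.toNat := by
    rw [ht, List.length_take]
    omega
  have hrange : PySem.List.pyRange 0 a_size 1 = PySem.List.pyRange 0 (PySem.List.len t) 1 := by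
    have hl : PySem.List.len t = (a_size.toNat : Int) := by
      simp [PySem.List.len, hlen]
    rw [hl]
    by_cases h0 : 0 ≤ a_size
    · rw [Int.toNat_of_nonneg h0]
    · rw [PySem.List.pyRange_one_eq_nil (by omega), PySem.List.pyRange_one_eq_nil (by omega)]
  rw [hrange]
  have hcongr : (PySem.List.pyRange 0 (PySem.List.len t) 1).foldl
      (fun (s : Int × Int) i => if PySem.List.pyGetD a i 0 = 0 then (0, s.2)
        else (s.1 + 1, max s.2 (s.1 + 1))) (0, 0)
      = (PySem.List.pyRange 0 (PySem.List.len t) 1).foldl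
      (fun (s : Int × Int) i => stepA s (PySem.List.pyGetD t i 0)) (0, 0) := by
    apply PySem.List.foldl_congr_mem
    intro acc i hi
    have hmem := (PySem.List.mem_pyRange_one).1 hi
    have hlt : i < (t.length : Int) := by
      have : PySem.List.len t = (t.length : Int) := by simp [PySem.List.len]
      omega
    have hilt : i.toNat < t.length := by omega
    have hget : PySem.List.pyGetD t i 0 = PySem.List.pyGetD a i 0 := by
      rw [PySem.List.pyGetD_of_nonneg t 0 hmem.1, PySem.List.pyGetD_of_nonneg a 0 hmem.1]
      rw [List.getD_eq_getElem _ _ hilt,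
          List.getD_eq_getElem _ _ (show i.toNat < a.length by
            rw [ht, List.length_take] at hilt; omega)]
      simp [ht, List.getElem_take]
    rw [hget]
    rfl
  rw [hcongr]
  have := PySem.List.foldl_pyRange_pyGetD t 0 stepA ((0 : Int), (0 : Int)) (le_refl (0 : Int))
  simp only [Int.toNat_zero, List.drop_zero] at this
  exact congrArg Prod.snd this

-- ===== VERDICT (by name: the statement is the Claim_ definition above) =====
theorem concecutive_spec : Claim_equal_concecutive := by
  intro a a_size _ hpre
  unfold Spec_concecutive concecutive_alt
  rw [prefix_eq, portA_eq_fold a a_size hpre,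
      loop_eq_runs (a.take a_size.toNat) 0 0 le_rfl le_rfl]
  have h0 : (0 : Int) ≤ (nzRunLens (a.take a_size.toNat) 0).foldl max 0 :=
    (PySem.List.le_foldl_max _ _).1
  rw [max_eq_right h0]
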